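-- pv_equiv track=rewrite | github.com/raymonddeng99/dawn | dawn_python/succinct.py | select_naive
-- ===== SOURCE A (Python) =====
-- def select_naive(bits, i):
--     cnt, j = 0, 0
--     for j in range(len(bits)):
--         if bits[j]:
--             cnt += 1
--             if cnt == i + 1:
--                 return j
--     return -1
-- ===== SOURCE B (Python) =====
-- def select_naive(bits, i):
--     # rank table + binary search: prefix[k] = number of set bits among bits[:k]
--     prefix = [0]
--     c = 0
--     for b in bits:
--         c += 1 if b else 0
--         prefix.append(c)
--     if i < 0 or c < i + 1:
--         return -1
--     lo, hi = 0, len(bits) - 1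
--     while lo < hi:
--         mid = (lo + hi) // 2
--         if prefix[mid + 1] >= i + 1:
--             hi = mid
--         else:
--             lo = mid + 1
--     return lo
-- ===== Notes on version B (the rewrite author's own statement) =====
-- stated objective: alternative
-- what changed: A finds the (i+1)-th set bit by a counting scan with early return; B precomputes a prefix popcount (rank) table in one pass and then binary-searches it for the first prefix reaching i+1, the classic rank/select formulation.
import Mathlib
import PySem

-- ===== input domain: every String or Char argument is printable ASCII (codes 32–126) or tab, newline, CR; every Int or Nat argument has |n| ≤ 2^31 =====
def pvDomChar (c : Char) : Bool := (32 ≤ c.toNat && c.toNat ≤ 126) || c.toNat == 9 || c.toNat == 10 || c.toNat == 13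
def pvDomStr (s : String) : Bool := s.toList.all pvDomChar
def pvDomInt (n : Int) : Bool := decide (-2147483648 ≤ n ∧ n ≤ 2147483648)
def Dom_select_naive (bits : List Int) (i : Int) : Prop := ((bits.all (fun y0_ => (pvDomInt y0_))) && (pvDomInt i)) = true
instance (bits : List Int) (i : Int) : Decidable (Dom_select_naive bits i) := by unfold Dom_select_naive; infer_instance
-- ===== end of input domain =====

-- B replaces A's counting scan with early return by a rank table (prefix popcounts) plus a
-- binary search for the first prefix reaching i+1 (objective: alternative algorithm, not faster).
-- ===== PORT A =====
-- Port A: the indexed loop with counter and early return, as structural recursion.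
def selGoA (i : Int) : List Int → Int → Int → Int
  | [], _, _ => -1
  | b :: rest, j, cnt =>
    if b ≠ 0 then
      if cnt + 1 = i + 1 then j
      else selGoA i rest (j + 1) (cnt + 1)
    else selGoA i rest (j + 1) cnt

def select_naive (bits : List Int) (i : Int) : Int := selGoA i bits 0 0

-- ===== PORT B =====
-- Port B: the while-loop binary search over the prefix table; indices prefix[mid+1] are
-- provably in range (0 ≤ lo ≤ mid < hi ≤ len bits - 1), so getD's default is never used.
def selBS (pfx : List Int) (i : Int) (lo hi : Int) : Int :=
  if _h : lo < hi then
    let mid := PySem.Int.floordiv (lo + hi) 2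
    if i + 1 ≤ pfx.getD (mid + 1).toNat 0 then selBS pfx i lo mid
    else selBS pfx i (mid + 1) hi
  else lo
termination_by (hi - lo).toNat
decreasing_by
  · have := (PySem.Int.floordiv_two_mid_bounds (le_of_lt _h)).1
    have h2 : PySem.Int.floordiv (lo + hi) 2 < hi := by
      rw [PySem.Int.floordiv_eq_ediv_of_pos (by omega)]; omega
    omega
  · have h2 : lo ≤ PySem.Int.floordiv (lo + hi) 2 := by
      rw [PySem.Int.floordiv_eq_ediv_of_pos (by omega)]; omega
    omega

def select_naive_alt (bits : List Int) (i : Int) : Int :=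
  let st := bits.foldl (fun (st : List Int × Int) b =>
      let c := st.2 + (if b ≠ 0 then 1 else 0)
      (st.1 ++ [c], c)) ([0], 0)
  if i < 0 ∨ st.2 < i + 1 then -1
  else selBS st.1 i 0 ((bits.length : Int) - 1)

-- ===== PRECONDITION & SPEC =====
def Spec_select_naive (bits : List Int) (i : Int) (out : Int) : Prop := out = select_naive_alt bits i
instance (bits : List Int) (i : Int) (out : Int) : Decidable (Spec_select_naive bits i out) := by unfold Spec_select_naive; infer_instance

-- ===== CLAIM =====
def Claim_equal_select_naive : Prop := ∀ (bits : List Int) (i : Int), Dom_select_naive bits i → Spec_select_naive bits i (select_naive bits i)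

-- ===== LEMMAS AND PROOFS =====

-- number of nonzero entries
def Fcnt : List Int → Int
  | [] => 0
  | b :: rest => (if b ≠ 0 then 1 else 0) + Fcnt rest

-- number of nonzero entries among the first k
def FkN : List Int → Nat → Int
  | _, 0 => 0
  | [], _+1 => 0
  | b :: rest, k+1 => (if b ≠ 0 then 1 else 0) + FkN rest k

-- structural reformulation of A's scan
def selR : List Int → Int → Int
  | [], _ => -1
  | b :: rest, i =>
    if b ≠ 0 then
      if i = 0 then 0
      else (if selR rest (i - 1) = -1 then -1 else selR rest (i - 1) + 1)
    else (if selR rest i = -1 then -1 else selR rest i + 1)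

-- the proof-side prefix list
def prefAux : List Int → Int → List Int
  | [], _ => []
  | b :: rest, c => (c + (if b ≠ 0 then 1 else 0)) :: prefAux rest (c + (if b ≠ 0 then 1 else 0))

theorem selR_ge (bits : List Int) : ∀ i : Int, -1 ≤ selR bits i := by
  induction bits with
  | nil => intro i; simp [selR]
  | cons b rest ih =>
    intro i
    simp only [selR]
    split_ifs with h1 h2 h3 h3 <;> first | omega | (have := ih (i-1); omega) | (have := ih i; omega)

theorem selGoA_shift (i : Int) : ∀ (bits : List Int) (j cnt : Int),
    selGoA i bits j cnt = (if selR bits (i - cnt) = -1 then -1 else selR bits (i - cnt) + j) := by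
  intro bits
  induction bits generalizing i with
  | nil => intro j cnt; simp [selGoA, selR]
  | cons b rest ih =>
    intro j cnt
    by_cases hb : b ≠ 0
    · simp only [selGoA, selR, if_pos hb]
      by_cases hc : cnt + 1 = i + 1
      · have : i - cnt = 0 := by omega
        simp [hc, this]
      · rw [if_neg hc, ih]
        have hne : ¬ (i - cnt = 0) := by omega
        rw [if_neg hne]
        have hic : i - (cnt + 1) = i - cnt - 1 := by omega
        rw [hic]
        have := selR_ge rest (i - cnt - 1)
        by_cases hm : selR rest (i - cnt - 1) = -1
        · simp [hm]
        · rw [if_neg hm, if_neg (by omega), if_neg (by omega)]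
          omega
    · simp only [selGoA, selR, if_neg hb]
      rw [ih]
      have := selR_ge rest (i - cnt)
      by_cases hm : selR rest (i - cnt) = -1
      · simp [hm]
      · rw [if_neg hm, if_neg (by omega), if_neg (by omega)]
        omega

theorem select_eq_selR (bits : List Int) (i : Int) : select_naive bits i = selR bits i := by
  unfold select_naive
  rw [selGoA_shift]
  have := selR_ge bits i
  simp only [Int.sub_zero]
  split_ifs with h <;> omega

theorem FkN_nonneg (bits : List Int) : ∀ k, 0 ≤ FkN bits k := by
  induction bits with
  | nil => intro k; cases k <;> simp [FkN]
  | cons b rest ih =>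
    intro k
    cases k with
    | zero => simp [FkN]
    | succ k => simp only [FkN]; have := ih k; split_ifs <;> omega

theorem FkN_mono (bits : List Int) : ∀ k k' : Nat, k ≤ k' → FkN bits k ≤ FkN bits k' := by
  induction bits with
  | nil => intro k k' _; cases k <;> cases k' <;> simp [FkN]
  | cons b rest ih =>
    intro k k' hkk
    cases k with
    | zero => simpa [FkN] using FkN_nonneg (b :: rest) k'
    | succ k =>
      cases k' with
      | zero => omega
      | succ k' =>
        simp only [FkN]
        have := ih k k' (by omega)
        split_ifs <;> omega

theorem Fcnt_eq_FkN (bits : List Int) : Fcnt bits = FkN bits bits.length := by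
  induction bits with
  | nil => simp [Fcnt, FkN]
  | cons b rest ih => simp [Fcnt, FkN, ih]

theorem Fcnt_nonneg (bits : List Int) : 0 ≤ Fcnt bits := by
  rw [Fcnt_eq_FkN]; exact FkN_nonneg bits bits.length

theorem selR_neg (bits : List Int) : ∀ i : Int, i < 0 → selR bits i = -1 := by
  induction bits with
  | nil => intro i _; simp [selR]
  | cons b rest ih =>
    intro i hi
    simp only [selR]
    rw [ih i hi, ih (i - 1) (by omega)]
    split_ifs with h1 h2 <;> first | rfl | omega

theorem selR_big (bits : List Int) : ∀ i : Int, Fcnt bits ≤ i → selR bits i = -1 := by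
  induction bits with
  | nil => intro i _; simp [selR]
  | cons b rest ih =>
    intro i hi
    simp only [Fcnt] at hi
    have hr := Fcnt_nonneg rest
    by_cases hb : b ≠ 0
    · rw [if_pos hb] at hi
      simp only [selR, if_pos hb]
      rw [if_neg (by omega : ¬ i = 0), ih (i - 1) (by omega)]
      simp
    · rw [if_neg hb] at hi
      simp only [selR, if_neg hb]
      rw [ih i (by omega)]
      simp

-- characterisation of A's answer when it exists
theorem selR_char (bits : List Int) : ∀ i : Int, 0 ≤ i → i + 1 ≤ Fcnt bits →
    0 ≤ selR bits i ∧ selR bits i < (bits.length : Int) ∧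
    FkN bits (selR bits i).toNat ≤ i ∧ i + 1 ≤ FkN bits ((selR bits i).toNat + 1) := by
  induction bits with
  | nil => intro i h0 h1; simp [Fcnt] at h1; omega
  | cons b rest ih =>
    intro i h0 h1
    simp only [Fcnt] at h1
    by_cases hb : b ≠ 0
    · rw [if_pos hb] at h1
      by_cases hi : i = 0
      · subst hi
        simp [selR, hb, FkN]
      · obtain ⟨c0, c1, c2, c3⟩ := ih (i - 1) (by omega) (by omega)
        simp only [selR, if_pos hb, if_neg hi, if_neg (by omega : ¬ selR rest (i-1) = -1)]
        have ht : (selR rest (i - 1) + 1).toNat = (selR rest (i - 1)).toNat + 1 := by omega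
        refine ⟨by omega, by simp; omega, ?_, ?_⟩
        · rw [ht]; simp only [FkN, if_pos hb]; omega
        · rw [ht]; simp only [FkN, if_pos hb]; omega
    · rw [if_neg hb] at h1
      obtain ⟨c0, c1, c2, c3⟩ := ih i h0 (by omega)
      simp only [selR, if_neg hb, if_neg (by omega : ¬ selR rest i = -1)]
      have ht : (selR rest i + 1).toNat = (selR rest i).toNat + 1 := by omega
      refine ⟨by omega, by simp; omega, ?_, ?_⟩
      · rw [ht]; simp only [FkN, if_neg hb]; omega
      · rw [ht]; simp only [FkN, if_neg hb]; omega

-- the fold of port B builds prefAux and the total count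
theorem fold_pref (bits : List Int) : ∀ (p : List Int) (c : Int),
    bits.foldl (fun (st : List Int × Int) b =>
      let c := st.2 + (if b ≠ 0 then 1 else 0)
      (st.1 ++ [c], c)) (p, c) = (p ++ prefAux bits c, c + Fcnt bits) := by
  induction bits with
  | nil => intro p c; simp [prefAux, Fcnt]
  | cons b rest ih =>
    intro p c
    simp only [List.foldl_cons, ih, prefAux, Fcnt]
    rw [Prod.mk.injEq]
    exact ⟨by simp, by split_ifs <;> omega⟩

-- prefix table values at in-range indices
theorem pref_getD (bits : List Int) : ∀ (c : Int) (k : Nat), k ≤ bits.length →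
    (c :: prefAux bits c).getD k 0 = c + FkN bits k := by
  induction bits with
  | nil =>
    intro c k hk
    have hk0 : k = 0 := by simpa using hk
    subst hk0; simp [prefAux, FkN]
  | cons b rest ih =>
    intro c k hk
    cases k with
    | zero => simp [FkN]
    | succ k =>
      simp only [prefAux, List.getD_cons_succ, FkN]
      rw [ih _ k (by simpa using hk)]
      split_ifs <;> omega

-- the binary search homes in on the unique bracketed index r
theorem selBS_eq (bits : List Int) (i r : Int)
    (hr0 : 0 ≤ r)
    (hlow : FkN bits r.toNat ≤ i) (hhigh : i + 1 ≤ FkN bits (r.toNat + 1)) :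
    ∀ (n : Nat) (lo hi : Int), (hi - lo).toNat = n → 0 ≤ lo → lo ≤ r → r ≤ hi →
      hi < (bits.length : Int) →
      selBS (0 :: prefAux bits 0) i lo hi = r := by
  intro n
  induction n using Nat.strong_induction_on with
  | _ n ih =>
    intro lo hi hn h0 h1 h2 h3
    by_cases hlt : lo < hi
    · rw [selBS, dif_pos hlt]
      have hmb := PySem.Int.floordiv_two_mid_bounds (le_of_lt hlt)
      set mid := PySem.Int.floordiv (lo + hi) 2 with hmid
      have hmlt : mid < hi := by
        rw [hmid, PySem.Int.floordiv_eq_ediv_of_pos (by omega)]; omega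
      have hget : (0 :: prefAux bits 0).getD (mid + 1).toNat 0 = FkN bits (mid + 1).toNat := by
        rw [pref_getD bits 0 (mid + 1).toNat (by omega)]; omega
      by_cases hc : i + 1 ≤ (0 :: prefAux bits 0).getD (mid + 1).toNat 0
      · rw [if_pos hc]
        rw [hget] at hc
        have hrm : r ≤ mid := by
          by_contra hcon
          have : (mid + 1).toNat ≤ r.toNat := by omega
          have := FkN_mono bits _ _ this
          omega
        exact ih (mid - lo).toNat (by omega) lo mid rfl h0 h1 hrm (by omega)
      · rw [if_neg hc]
        rw [hget] at hc
        have hrm : mid + 1 ≤ r := by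
          by_contra hcon
          have : r.toNat + 1 ≤ (mid + 1).toNat := by omega
          have := FkN_mono bits _ _ this
          omega
        exact ih (hi - (mid + 1)).toNat (by omega) (mid + 1) hi rfl (by omega) hrm h2 h3
    · rw [selBS, dif_neg hlt]
      omega

-- ===== VERDICT =====
theorem select_naive_spec : Claim_equal_select_naive := by
  intro bits i _
  unfold Spec_select_naive select_naive_alt
  rw [fold_pref bits [0] 0, select_eq_selR]
  simp only [List.cons_append, List.nil_append, Int.zero_add]
  by_cases hE : i < 0 ∨ Fcnt bits < i + 1
  · rw [if_pos hE]
    rcases hE with h | h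
    · exact selR_neg bits i h
    · exact selR_big bits i (by omega)
  · rw [if_neg hE]
    rw [not_or] at hE
    obtain ⟨h0, h1⟩ := hE
    obtain ⟨c0, c1, c2, c3⟩ := selR_char bits i (by omega) (by omega)
    exact (selBS_eq bits i (selR bits i) c0 c2 c3 _ 0 _ rfl (by omega) (by omega) (by omega) (by omega)).symm
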